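-- pv_equiv track=rewrite | github.com/shuvrobasu/File_Splitter | file_splitter.py | remove_consecutive_comments
-- ===== SOURCE A (Python) =====
-- def remove_consecutive_comments(text: str, min_consecutive: int = 3) -> str:
--     """Remove blocks of 3 or more consecutive comment lines."""
--     lines = text.splitlines(keepends=True)
--     result = []
--     comment_block = []
--
--     for line in lines:
--         stripped = line.strip()
--         is_comment = stripped.startswith('#')
--
--         if is_comment:
--             comment_block.append(line)
--         else:
--             if len(comment_block) < min_consecutive:
--                 result.extend(comment_block)
--             comment_block = []
--             result.append(line)
--
--     # Handle trailing comments
--     if len(comment_block) < min_consecutive: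
--         result.extend(comment_block)
--
--     return ''.join(result)
-- ===== SOURCE B (Python) =====
-- def remove_consecutive_comments(text: str, min_consecutive: int = 3) -> str:
--     """Remove blocks of 3 or more consecutive comment lines."""
--     lines = text.splitlines(keepends=True)
--     out = []
--     i, n = 0, len(lines)
--     while i < n:
--         if lines[i].strip().startswith('#'):
--             j = i + 1
--             while j < n and lines[j].strip().startswith('#'):
--                 j += 1
--             if j - i < min_consecutive:
--                 out += lines[i:j]
--             i = j
--         else:
--             out.append(lines[i])
--             i += 1
--     return ''.join(out)
-- ===== Notes on version B (the rewrite author's own statement) =====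
-- stated objective: alternative
-- what changed: B replaces A's flush-buffer state machine (a comment_block list carried across iterations and flushed on non-comment lines and at the end) with a two-pointer run scanner that, on meeting a comment line, scans the whole comment run at once and keeps or drops it immediately.
import Mathlib
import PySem

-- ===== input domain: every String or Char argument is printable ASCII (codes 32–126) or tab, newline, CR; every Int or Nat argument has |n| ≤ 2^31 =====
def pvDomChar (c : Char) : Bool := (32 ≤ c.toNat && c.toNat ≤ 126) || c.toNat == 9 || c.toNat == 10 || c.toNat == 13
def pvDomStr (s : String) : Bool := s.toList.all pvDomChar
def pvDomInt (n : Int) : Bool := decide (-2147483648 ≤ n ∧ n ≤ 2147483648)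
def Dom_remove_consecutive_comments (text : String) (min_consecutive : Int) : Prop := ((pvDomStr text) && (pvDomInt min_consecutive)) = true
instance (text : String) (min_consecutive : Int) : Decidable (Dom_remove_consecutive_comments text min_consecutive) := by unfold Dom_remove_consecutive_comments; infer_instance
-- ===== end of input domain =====

-- B replaces A's flush-buffer state machine with a two-pointer comment-run scanner; same cost, different decomposition (objective: alternative).

-- shared port of Python's text.splitlines(keepends=True); exact on Dom, where the
-- only line-break characters are '\n', '\r' and "\r\n"
def pvSplitKeep (acc : List Char) : List Char → List String
  | [] => if acc.isEmpty then [] else [String.ofList acc.reverse]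
  | '\n' :: rest => String.ofList (acc.reverse ++ ['\n']) :: pvSplitKeep [] rest
  | '\r' :: '\n' :: rest => String.ofList (acc.reverse ++ ['\r', '\n']) :: pvSplitKeep [] rest
  | '\r' :: rest => String.ofList (acc.reverse ++ ['\r']) :: pvSplitKeep [] rest
  | c :: rest => pvSplitKeep (c :: acc) rest

-- shared port of line.strip().startswith('#') (used verbatim by both Pythons)
def pvIsComment (line : String) : Bool :=
  PySem.Str.startswith (PySem.Str.strip line) "#"

-- ===== PORT A =====
def remove_consecutive_comments (text : String) (min_consecutive : Int) : String :=
  let lines := pvSplitKeep [] text.toList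
  let st := lines.foldl
    (fun (acc : List String × List String) line =>
      let is_comment := pvIsComment line
      if is_comment then (acc.1, acc.2 ++ [line])
      else ((if (acc.2.length : Int) < min_consecutive then acc.1 ++ acc.2 else acc.1) ++ [line], []))
    ([], [])
  -- handle trailing comments
  let res := if (st.2.length : Int) < min_consecutive then st.1 ++ st.2 else st.1
  PySem.Str.join "" res

-- ===== PORT B =====
-- the run scanner of Source B: a non-comment line is emitted at once; at a comment
-- line the inner while-loop scan (= takeWhile/dropWhile on the comment flag)
-- delimits the whole run, kept iff shorter than min_consecutive
def pvRunsB (min_consecutive : Int) : List String → List String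
  | [] => []
  | l :: ls =>
    if pvIsComment l then
      let grp := l :: ls.takeWhile pvIsComment
      (if (grp.length : Int) < min_consecutive then grp else []) ++
        pvRunsB min_consecutive (ls.dropWhile pvIsComment)
    else l :: pvRunsB min_consecutive ls
termination_by ls => ls.length
decreasing_by
  · simpa using Nat.lt_succ_of_le (List.length_dropWhile_le _ _)
  · simp

def remove_consecutive_comments_alt (text : String) (min_consecutive : Int) : String :=
  PySem.Str.join "" (pvRunsB min_consecutive (pvSplitKeep [] text.toList))

-- ===== PRECONDITION & SPEC =====
def Spec_remove_consecutive_comments (text : String) (min_consecutive : Int) (out : String) : Prop := out = remove_consecutive_comments_alt text min_consecutive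
instance (text : String) (min_consecutive : Int) (out : String) : Decidable (Spec_remove_consecutive_comments text min_consecutive out) := by unfold Spec_remove_consecutive_comments; infer_instance

-- ===== CLAIM (what is proved, stated in full; the proofs are below) =====
def Claim_equal_remove_consecutive_comments : Prop := ∀ (text : String) (min_consecutive : Int), Dom_remove_consecutive_comments text min_consecutive → Spec_remove_consecutive_comments text min_consecutive (remove_consecutive_comments text min_consecutive)

-- ===== LEMMAS AND PROOFS =====

-- A's loop, phrased recursively: pending comment block cb, remaining lines
def pvFA (min_consecutive : Int) (cb : List String) : List String → List String
  | [] => if (cb.length : Int) < min_consecutive then cb else []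
  | l :: ls =>
    if pvIsComment l then pvFA min_consecutive (cb ++ [l]) ls
    else (if (cb.length : Int) < min_consecutive then cb else []) ++ l :: pvFA min_consecutive [] ls

theorem pvFA_eq_foldl (min_consecutive : Int) :
    ∀ (ls : List String) (res cb : List String),
      ((fun st : List String × List String =>
          if (st.2.length : Int) < min_consecutive then st.1 ++ st.2 else st.1)
        (ls.foldl
          (fun (acc : List String × List String) line =>
            if pvIsComment line then (acc.1, acc.2 ++ [line])
            else ((if (acc.2.length : Int) < min_consecutive then acc.1 ++ acc.2 else acc.1) ++ [line], []))
          (res, cb)))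
      = res ++ pvFA min_consecutive cb ls := by
  intro ls
  induction ls with
  | nil =>
    intro res cb
    simp only [List.foldl_nil, pvFA]
    split <;> simp
  | cons l ls ih =>
    intro res cb
    rw [List.foldl_cons, pvFA]
    by_cases h : pvIsComment l = true
    · simp only [h, if_true]
      exact ih res (cb ++ [l])
    · simp only [h, if_false, Bool.false_eq_true]
      have h2 := ih ((if (cb.length : Int) < min_consecutive then res ++ cb else res) ++ [l]) []
      simp only at h2
      rw [h2]
      split <;> simp

theorem pvRunsB_group (min_consecutive : Int) (ls : List String) :
    pvRunsB min_consecutive ls =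
      (if ((ls.takeWhile pvIsComment).length : Int) < min_consecutive
        then ls.takeWhile pvIsComment else []) ++
        pvRunsB min_consecutive (ls.dropWhile pvIsComment) := by
  cases ls with
  | nil => simp [pvRunsB]
  | cons l ls =>
    by_cases h : pvIsComment l = true
    · rw [pvRunsB]; simp [h]
    · rw [List.takeWhile_cons_of_neg (by simp [h]), List.dropWhile_cons_of_neg (by simp [h])]
      split <;> simp

theorem pvFA_eq_runsB (min_consecutive : Int) :
    ∀ (ls : List String) (cb : List String),
      pvFA min_consecutive cb ls =
        (if ((cb ++ ls.takeWhile pvIsComment).length : Int) < min_consecutive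
          then cb ++ ls.takeWhile pvIsComment else []) ++
          pvRunsB min_consecutive (ls.dropWhile pvIsComment) := by
  intro ls
  induction ls with
  | nil => intro cb; simp [pvFA, pvRunsB]
  | cons l ls ih =>
    intro cb
    by_cases h : pvIsComment l = true
    · rw [pvFA, if_pos h, ih (cb ++ [l]),
        List.takeWhile_cons_of_pos h, List.dropWhile_cons_of_pos h]
      simp
    · rw [pvFA, if_neg (by simp [h]),
        List.takeWhile_cons_of_neg (by simp [h]), List.dropWhile_cons_of_neg (by simp [h]),
        ih [], show pvRunsB min_consecutive (l :: ls) = l :: pvRunsB min_consecutive ls from by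
          rw [pvRunsB]; simp [h],
        pvRunsB_group min_consecutive ls]
      simp

-- ===== VERDICT (by name: the statement is the Claim_ definition above) =====
theorem remove_consecutive_comments_spec : Claim_equal_remove_consecutive_comments := by
  intro text min_consecutive _
  show remove_consecutive_comments text min_consecutive = _
  have key : ∀ ls : List String,
      ((fun st : List String × List String =>
          if (st.2.length : Int) < min_consecutive then st.1 ++ st.2 else st.1)
        (ls.foldl
          (fun (acc : List String × List String) line =>
            if pvIsComment line then (acc.1, acc.2 ++ [line])
            else ((if (acc.2.length : Int) < min_consecutive then acc.1 ++ acc.2 else acc.1) ++ [line], []))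
          ([], [])))
      = pvRunsB min_consecutive ls := by
    intro ls
    rw [pvFA_eq_foldl min_consecutive ls [] [], pvFA_eq_runsB min_consecutive ls [],
      List.nil_append, List.nil_append]
    exact (pvRunsB_group min_consecutive ls).symm
  exact congrArg (PySem.Str.join "") (key (pvSplitKeep [] text.toList))
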